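-- pv_equiv track=rewrite | github.com/alancast/LeetCodeProblems | python/medium/1498_num_subsequences_for_sum_condition.py | numSubseq_binary_search
-- ===== SOURCE A (Python) =====
-- import bisect
-- from typing import List
--
-- def numSubseq_binary_search(nums: List[int], target: int) -> int:
--     mod = 10 ** 9 + 7
--
--     n = len(nums)
--     nums.sort()
--
--     answer = 0
--
--     # every starting min find how many nums we need to exclude
--     for i in range(n):
--         min_num = nums[i]
--         max_possible = target - min_num
--
--         # We can no longer create a subset that isn't already counted
--         if max_possible < min_num:
--             break
--
--         # Find rightmost index (largest num) still useable and compute subsequences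
--         right = bisect.bisect_right(nums, max_possible) - 1
--         answer += pow(2, right - i, mod)
--
--
--     return answer % mod
-- ===== SOURCE B (Python) =====
-- from typing import List
--
-- def numSubseq_binary_search(nums: List[int], target: int) -> int:
--     # Two-pointer sweep instead of per-element bisect.
--     # Like A, sorts nums in place (same observable mutation).
--     mod = 10 ** 9 + 7
--     nums.sort()
--     answer = 0
--     left, right = 0, len(nums) - 1
--     while left <= right:
--         if nums[left] + nums[right] <= target:
--             answer = (answer + pow(2, right - left, mod)) % mod
--             left += 1
--         else:
--             right -= 1
--     return answer % mod
-- ===== Notes on version B (the rewrite author's own statement) =====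
-- stated objective: alternative
-- what changed: Replaces the per-minimum bisect_right + modular pow loop with a single converging two-pointer sweep over the sorted array that adds pow(2, right-left, mod) whenever nums[left]+nums[right] <= target.
import Mathlib
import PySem

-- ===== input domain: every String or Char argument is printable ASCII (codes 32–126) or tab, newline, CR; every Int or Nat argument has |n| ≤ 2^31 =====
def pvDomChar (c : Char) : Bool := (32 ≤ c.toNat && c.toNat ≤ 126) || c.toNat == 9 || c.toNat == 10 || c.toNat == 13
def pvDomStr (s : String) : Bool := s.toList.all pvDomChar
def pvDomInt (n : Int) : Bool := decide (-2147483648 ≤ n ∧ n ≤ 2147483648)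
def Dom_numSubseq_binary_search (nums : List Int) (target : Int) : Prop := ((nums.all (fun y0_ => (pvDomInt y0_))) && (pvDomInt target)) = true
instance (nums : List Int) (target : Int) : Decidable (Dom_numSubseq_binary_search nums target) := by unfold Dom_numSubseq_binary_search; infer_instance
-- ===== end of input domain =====

-- B replaces A's per-minimum bisect_right + modular pow with a single converging
-- two-pointer sweep over the sorted array (same cost class; both sort nums in place,
-- the equivalence proved here is about the return value).


-- ===== PORT A =====
-- A's loop over i = 0..n-1 with the early `break`; `answer += pow(2, right - i, mod)`.
-- pow(2, e, mod) is PySem.Int.powMod; the exponent `right - i` is nonnegative at every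
-- call A makes (the guard `max_possible >= min_num` guarantees it), so `.toNat` is exact there.
def pvLoopA (s : List Int) (t : Int) (n : Nat) (i : Nat) (answer : Int) : Int :=
  if _h : i < n then
    let min_num := s[i]!
    let max_possible := t - min_num
    if max_possible < min_num then answer
    else
      let right : Int := (PySem.List.bisectRight s max_possible : Int) - 1
      pvLoopA s t n (i + 1) (answer + PySem.Int.powMod 2 (right - (i : Int)).toNat 1000000007)
  else answer
termination_by n - i

def numSubseq_binary_search (nums : List Int) (target : Int) : Int :=
  let n := nums.length
  let s := PySem.List.sorted nums (fun x => x)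
  pvLoopA s target n 0 0 % 1000000007

-- ===== PORT B =====
-- B's while-loop with two Int pointers; indices are nonnegative whenever read
-- (left ≥ 0 always, right ≥ left inside the loop), so `.toNat` indexing is exact.
def pvLoopB (s : List Int) (t : Int) (left right answer : Int) : Int :=
  if _h : left ≤ right then
    if s[left.toNat]! + s[right.toNat]! ≤ t then
      pvLoopB s t (left + 1) right
        ((answer + PySem.Int.powMod 2 (right - left).toNat 1000000007) % 1000000007)
    else
      pvLoopB s t left (right - 1) answer
  else answer
termination_by (right + 1 - left).toNat
decreasing_by all_goals omega

def numSubseq_binary_search_alt (nums : List Int) (target : Int) : Int :=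
  let s := PySem.List.sorted nums (fun x => x)
  pvLoopB s target 0 ((nums.length : Int) - 1) 0 % 1000000007

-- ===== PRECONDITION & SPEC =====
def Spec_numSubseq_binary_search (nums : List Int) (target : Int) (out : Int) : Prop := out = numSubseq_binary_search_alt nums target
instance (nums : List Int) (target : Int) (out : Int) : Decidable (Spec_numSubseq_binary_search nums target out) := by unfold Spec_numSubseq_binary_search; infer_instance

-- ===== CLAIM (what is proved, stated in full; the proofs are below) =====
def Claim_equal_numSubseq_binary_search : Prop := ∀ (nums : List Int) (target : Int), Dom_numSubseq_binary_search nums target → Spec_numSubseq_binary_search nums target (numSubseq_binary_search nums target)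

-- ===== LEMMAS AND PROOFS =====

-- The common reference sum: over i from a given start, each index i with
-- 2*s[i] ≤ t contributes 2^(bisectRight s (t - s[i]) - (i+1)) (unreduced).
def pvSsum (s : List Int) (t : Int) (n : Nat) (i : Nat) : Int :=
  if _h : i < n then
    (if 2 * s[i]! ≤ t then
        (2 : Int) ^ (PySem.List.bisectRight s (t - s[i]!) - (i + 1))
      else 0) + pvSsum s t n (i + 1)
  else 0
termination_by n - i

theorem pvPowMod_eq (e : Nat) :
    PySem.Int.powMod 2 e 1000000007 = 2 ^ e % 1000000007 := by
  simp [PySem.Int.powMod]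

theorem pvMono {s : List Int} (hp : s.Pairwise (· ≤ ·)) {i j : Nat}
    (hij : i ≤ j) (hj : j < s.length) : s[i]! ≤ s[j]! := by
  have hi : i < s.length := lt_of_le_of_lt (by omega) hj
  rw [getElem!_pos s i hi, getElem!_pos s j hj]
  rcases Nat.lt_or_ge i j with h | h
  · exact List.pairwise_iff_getElem.mp hp i j hi hj h
  · have : i = j := by omega
    subst this; exact le_refl _

theorem pvSsum_zero {s : List Int} {t : Int} {n : Nat} (hn : n = s.length)
    (i : Nat) (h : ∀ j, i ≤ j → j < n → ¬ (2 * s[j]! ≤ t)) :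
    pvSsum s t n i = 0 := by
  unfold pvSsum
  split
  · rename_i hi
    rw [if_neg (h i (le_refl _) hi), pvSsum_zero hn (i + 1)
      (fun j hj hjn => h j (by omega) hjn)]
    ring
  · rfl
termination_by n - i

-- bisectRight characterisation at a valid index: if nums[l] + nums[r] ≤ t and every
-- index j > r has nums[l] + nums[j] > t, then bisectRight s (t - s[l]) = r + 1.
theorem pvBisect_eq {s : List Int} (hp : s.Pairwise (· ≤ ·)) {t : Int} {l r : Nat}
    (hr : r < s.length)
    (hle : s[l]! + s[r]! ≤ t)
    (hgt : ∀ j, r < j → j < s.length → t < s[l]! + s[j]!) :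
    PySem.List.bisectRight s (t - s[l]!) = r + 1 := by
  obtain ⟨hlen, hlo, hhi⟩ := PySem.List.bisectRight_spec s (t - s[l]!) hp
  by_contra hne
  rcases Nat.lt_or_ge (PySem.List.bisectRight s (t - s[l]!)) (r + 1) with h | h
  · have := hhi r hr (by omega)
    rw [getElem!_pos s r hr] at hle
    omega
  · have hr1 : r + 1 < s.length := by omega
    have h1 := hlo (r + 1) hr1 (by omega)
    have h2 := hgt (r + 1) (by omega) hr1
    rw [getElem!_pos s (r + 1) hr1] at h2
    omega

-- A's loop computes the reference sum (mod p).
theorem pvLoopA_eq {s : List Int} {t : Int} {n : Nat} (hp : s.Pairwise (· ≤ ·))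
    (hn : n = s.length) (i : Nat) (acc : Int) :
    pvLoopA s t n i acc % 1000000007 = (acc + pvSsum s t n i) % 1000000007 := by
  unfold pvLoopA pvSsum
  split
  · rename_i hi
    by_cases hb : t - s[i]! < s[i]!
    · rw [if_pos hb, if_neg (by omega)]
      rw [pvSsum_zero hn (i + 1) (fun j hj hjn => by
        have := pvMono hp (show i ≤ j by omega) (by omega : j < s.length)
        omega)]
      ring_nf
    · rw [if_neg hb, if_pos (by omega)]
      rw [pvLoopA_eq hp hn (i + 1)]
      -- the bisect count is at least i+1, so the Int exponent is the Nat exponent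
      have hcnt : i + 1 ≤ PySem.List.bisectRight s (t - s[i]!) := by
        obtain ⟨hlen, hlo, hhi⟩ := PySem.List.bisectRight_spec s (t - s[i]!) hp
        by_contra hlt
        have h3 := hhi i (by omega) (by omega)
        rw [← getElem!_pos s i (by omega)] at h3
        omega
      have hexp : ((PySem.List.bisectRight s (t - s[i]!) : Int) - 1 - (i : Int)).toNat
          = PySem.List.bisectRight s (t - s[i]!) - (i + 1) := by omega
      rw [pvPowMod_eq, hexp]
      generalize (2 : Int) ^ (PySem.List.bisectRight s (t - s[i]!) - (i + 1)) = x
      generalize pvSsum s t n (i + 1) = y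
      omega
  · simp
termination_by n - i

-- B's loop computes the same reference sum (mod p), under the two-pointer invariant.
theorem pvLoopB_eq {s : List Int} {t : Int} {n : Nat} (hp : s.Pairwise (· ≤ ·))
    (hn : n = s.length) (l r acc : Int) (hl : 0 ≤ l) (hr : r ≤ (n : Int) - 1)
    (hinv : ∀ i j : Nat, (l : Int) ≤ i → i < n → (r : Int) < j → j < n → t < s[i]! + s[j]!) :
    pvLoopB s t l r acc % 1000000007 = (acc + pvSsum s t n l.toNat) % 1000000007 := by
  unfold pvLoopB
  split
  · rename_i hlr
    have hrn : 0 ≤ r := le_trans hl hlr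
    have hln : l.toNat < n := by omega
    have hrnn : r.toNat < n := by omega
    by_cases hc : s[l.toNat]! + s[r.toNat]! ≤ t
    · rw [if_pos hc]
      rw [pvLoopB_eq hp hn (l + 1) r _ (by omega) hr
        (fun i j hi hin hj hjn => hinv i j (by omega) hin hj hjn)]
      have hbr : PySem.List.bisectRight s (t - s[l.toNat]!) = r.toNat + 1 :=
        pvBisect_eq hp (by omega) hc
          (fun j hj hjn => hinv l.toNat j (by omega) (by omega) (by omega) (by omega))
      conv_rhs => rw [pvSsum]
      rw [dif_pos hln]
      have h2l : 2 * s[l.toNat]! ≤ t := by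
        have := pvMono hp (show l.toNat ≤ r.toNat by omega) (by omega : r.toNat < s.length)
        omega
      rw [if_pos h2l, hbr]
      have hlt : (l + 1).toNat = l.toNat + 1 := by omega
      rw [hlt]
      have hexp : (r - l).toNat = r.toNat + 1 - (l.toNat + 1) := by omega
      rw [pvPowMod_eq, hexp]
      generalize (2 : Int) ^ (r.toNat + 1 - (l.toNat + 1)) = x
      generalize pvSsum s t n (l.toNat + 1) = y
      omega
    · rw [if_neg hc]
      rw [pvLoopB_eq hp hn l (r - 1) acc hl (by omega)
        (fun i j hi hin hj hjn => by
          rcases Int.lt_or_le (r : Int) j with h | h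
          · exact hinv i j hi hin h hjn
          · have hjr : j = r.toNat := by omega
            subst hjr
            have hsi : s[l.toNat]! ≤ s[i]! :=
              pvMono hp (by omega) (by omega : i < s.length)
            omega)]
  · rename_i hlr
    rw [pvSsum_zero hn l.toNat (fun j hj hjn => by
      have := hinv j j (by omega) hjn (by omega) hjn
      omega)]
    simp
termination_by (r + 1 - l).toNat
decreasing_by all_goals omega

-- ===== VERDICT (by name: the statement is the Claim_ definition above) =====
theorem numSubseq_binary_search_spec : Claim_equal_numSubseq_binary_search := by
  intro nums target _
  unfold Spec_numSubseq_binary_search numSubseq_binary_search numSubseq_binary_search_alt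
  have hp := PySem.List.sorted_pairwise nums (fun x => x)
  have hlen : (PySem.List.sorted nums (fun x => x)).length = nums.length :=
    PySem.List.length_sorted nums (fun x => x) false
  simp only []
  rw [pvLoopA_eq hp hlen.symm 0 0,
      pvLoopB_eq hp hlen.symm 0 ((nums.length : Int) - 1) 0 (le_refl 0) (by omega)
        (fun i j hi hin hj hjn => by omega)]
  simp
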